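-- pv_equiv track=rewrite | github.com/RoboStack/vinca | vinca/pixi_manifest.py | _parse_version_spec
-- ===== SOURCE A (Python) =====
-- _OPS: tuple[tuple[str, str], ...] = (
--     ("==", "version_eq"),
--     (">=", "version_gte"),
--     ("<=", "version_lte"),
--     (">", "version_gt"),
--     ("<", "version_lt"),
-- )
--
-- def _parse_version_spec(spec: str, conda_name: str) -> dict[str, str]:
--     """Translate a pixi/conda version spec into catkin_pkg Dependency fields.
--
--     Supports `==`, `>=`, `<=`, `>`, `<`, comma-separated AND clauses, and `*`
--     (or empty) for unconstrained. Rejects conda-isms package.xml can't express: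
--     bare `=`, wildcards (`1.2.*`), OR (`|`), compatible release (`~=`).
--     """
--     spec = spec.strip()
--     if spec in {"", "*"}:
--         return {}
--
--     out: dict[str, str] = {}
--     for clause in spec.split(","):
--         clause = clause.strip()
--         for op, field in _OPS:
--             if clause.startswith(op):
--                 version = clause[len(op) :].strip()
--                 if not version or any(c in version for c in "*|~"):
--                     raise ValueError(
--                         f"{conda_name}: unsupported version spec {spec!r} "
--                         f"(wildcards, '|', '~=' not supported)"
--                     )
--                 if field in out:
--                     raise ValueError(
--                         f"{conda_name}: duplicate {op} in version spec {spec!r}"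
--                     )
--                 out[field] = version
--                 break
--         else:
--             raise ValueError(
--                 f"{conda_name}: unsupported version spec {spec!r} "
--                 "(only ==, >=, <=, >, < and comma-AND are supported)"
--             )
--     return out
-- ===== SOURCE B (Python) =====
-- def _parse_version_spec(spec: str, conda_name: str) -> dict[str, str]:
--     """Single left-to-right character scan: no split(','), no operator table.
--
--     A two-character state machine recognises the operator, the version is read
--     by scanning ahead to the next comma; clauses are never materialised.
--     """
--     spec = spec.strip()
--     if spec in {"", "*"}:
--         return {}
--
--     out: dict[str, str] = {}
--     n = len(spec)
--     i = 0
--     while True: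
--         while i < n and spec[i].isspace():
--             i += 1
--         if i < n and spec[i] in "<>":
--             two = i + 1 < n and spec[i + 1] == "="
--             if spec[i] == ">":
--                 field = "version_gte" if two else "version_gt"
--             else:
--                 field = "version_lte" if two else "version_lt"
--             i += 2 if two else 1
--         elif i + 1 < n and spec[i] == "=" and spec[i + 1] == "=":
--             field = "version_eq"
--             i += 2
--         else:
--             raise ValueError(
--                 f"{conda_name}: unsupported version spec {spec!r} "
--                 "(only ==, >=, <=, >, < and comma-AND are supported)"
--             )
--         j = spec.find(",", i)
--         end = n if j == -1 else j
--         version = spec[i:end].strip()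
--         if not version or any(c in version for c in "*|~"):
--             raise ValueError(
--                 f"{conda_name}: unsupported version spec {spec!r} "
--                 f"(wildcards, '|', '~=' not supported)"
--             )
--         if field in out:
--             raise ValueError(f"{conda_name}: duplicate constraint in version spec {spec!r}")
--         out[field] = version
--         if j == -1:
--             return out
--         i = j + 1
-- ===== Notes on version B (the rewrite author's own statement) =====
-- stated objective: alternative
-- what changed: B replaces A's split-into-clauses-then-scan-the-operator-table loop by a single left-to-right character scanner: an explicit state machine over one string index that skips whitespace, recognises the operator from at most two characters, and reads the version by scanning ahead to the next comma - no split(','), no per-clause strip, no startswith loop over _OPS.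
import Mathlib
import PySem

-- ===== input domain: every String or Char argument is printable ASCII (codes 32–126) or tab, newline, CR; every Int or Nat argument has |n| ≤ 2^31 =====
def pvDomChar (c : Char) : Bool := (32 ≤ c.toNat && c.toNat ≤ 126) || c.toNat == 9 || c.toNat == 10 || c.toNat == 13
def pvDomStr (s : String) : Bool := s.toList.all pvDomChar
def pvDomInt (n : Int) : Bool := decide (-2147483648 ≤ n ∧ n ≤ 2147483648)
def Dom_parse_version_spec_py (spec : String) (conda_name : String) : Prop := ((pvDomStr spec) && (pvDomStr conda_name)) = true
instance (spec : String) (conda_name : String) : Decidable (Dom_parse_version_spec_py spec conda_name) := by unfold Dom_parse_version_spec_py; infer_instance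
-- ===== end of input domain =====

-- B replaces A's split-into-clauses-then-scan-the-operator-table loop by a single
-- left-to-right character scanner (a small state machine: skip whitespace, read the
-- operator from at most two characters, read the version up to the next comma);
-- it never materialises the clause list and never scans _OPS (objective: alternative).
-- Both programs raise ValueError on malformed specs; those inputs are outside Pre_.

-- ===== PORT A =====
def opsA : List (String × String) :=
  [("==", "version_eq"), (">=", "version_gte"), ("<=", "version_lte"),
   (">", "version_gt"), ("<", "version_lt")]

-- inner 'for op, field in _OPS: if clause.startswith(op): … break / else: raise'
def aFind : List (String × String) → List Char → Option (String × String)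
  | [], _ => none
  | (op, field) :: rest, clause =>
      if PySem.Chars.startswith clause op.toList then some (op, field)
      else aFind rest clause

-- outer 'for clause in spec.split(","): …'; none = the ValueError branches
def aLoop : List (List Char) → PySem.Dict String String → Option (PySem.Dict String String)
  | [], out => some out
  | c :: rest, out =>
      let clause := PySem.Chars.strip c
      match aFind opsA clause with
      | none => none
      | some (op, field) =>
          let version := PySem.Chars.strip (clause.drop op.toList.length)
          if version = [] ∨ version.contains '*' ∨ version.contains '|' ∨ version.contains '~' then
            none
          else if out.contains field then none
          else aLoop rest (out.insert field (String.ofList version))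

def parse_version_spec_py (spec : String) (conda_name : String) : List (String × String) :=
  let s := PySem.Chars.strip spec.toList
  if s = [] ∨ s = ['*'] then []
  else
    match aLoop (PySem.Chars.splitOn s [',']) PySem.Dict.empty with
    | none => []      -- A raises ValueError here (excluded by Pre_)
    | some out => out.items

-- ===== PORT B =====
-- the operator state machine of Source B: 'spec[i] in "<>"' with an optional following '=',
-- else the two-character '=='; returns the field and the unread remainder
def bReadOp : List Char → Option (String × List Char)
  | '>' :: '=' :: r => some ("version_gte", r)
  | '>' :: r => some ("version_gt", r)
  | '<' :: '=' :: r => some ("version_lte", r)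
  | '<' :: r => some ("version_lt", r)
  | '=' :: '=' :: r => some ("version_eq", r)
  | _ => none

-- the scanner consumes at least one character (termination of the while loop)
theorem bReadOp_shrink (s : List Char) (f : String) (r : List Char)
    (h : bReadOp s = some (f, r)) : r.length < s.length := by
  match s with
  | [] => simp [bReadOp] at h
  | [c] =>
    by_cases h1 : c = '>' <;> by_cases h2 : c = '<' <;> simp_all [bReadOp]
  | c1 :: c2 :: rest =>
    by_cases h1 : c1 = '=' <;> by_cases h2 : c1 = '>' <;> by_cases h3 : c1 = '<' <;>
      by_cases h4 : c2 = '=' <;> simp_all [bReadOp]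

-- the 'while True' loop of Source B over the remaining characters; none = ValueError
def bLoop (cs : List Char) (out : PySem.Dict String String) : Option (PySem.Dict String String) :=
  let s1 := cs.dropWhile PySem.Chars.isspace          -- 'while i < n and spec[i].isspace(): i += 1'
  match h : bReadOp s1 with
  | none => none                                      -- 'only ==, >=, <=, >, <' ValueError
  | some (field, r) =>
      -- 'j = spec.find(",", i)': the version is everything up to the next comma
      let version := PySem.Chars.strip (r.takeWhile (fun c => c != ','))
      if version = [] ∨ version.contains '*' ∨ version.contains '|' ∨ version.contains '~' then
        none
      else if out.contains field then none
      else
        match h2 : r.dropWhile (fun c => c != ',') with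
        | [] => some (out.insert field (String.ofList version))      -- 'if j == -1: return out'
        | _ :: t => bLoop t (out.insert field (String.ofList version))   -- 'i = j + 1'
termination_by cs.length
decreasing_by
  have hs1 : (cs.dropWhile PySem.Chars.isspace).length ≤ cs.length :=
    List.length_dropWhile_le _ _
  have hr : r.length < (cs.dropWhile PySem.Chars.isspace).length := bReadOp_shrink _ _ _ h
  have hd : (r.dropWhile (fun c => c != ',')).length ≤ r.length := List.length_dropWhile_le _ _
  rw [h2] at hd
  simp at hd
  omega

def parse_version_spec_py_alt (spec : String) (conda_name : String) : List (String × String) :=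
  let s := PySem.Chars.strip spec.toList
  if s = [] ∨ s = ['*'] then []
  else
    match bLoop s PySem.Dict.empty with
    | none => []      -- B raises ValueError here (excluded by Pre_)
    | some out => out.items

-- ===== PRECONDITION & SPEC =====
-- Pre_ excludes exactly the inputs on which A raises ValueError (clause with no
-- supported operator, empty version, '*'/'|'/'~' in a version, duplicate operator);
-- B raises ValueError on exactly the same inputs.
def pvField? (cs : List Char) : Option String :=
  match cs with
  | '=' :: '=' :: _ => some "version_eq"
  | '>' :: '=' :: _ => some "version_gte"
  | '<' :: '=' :: _ => some "version_lte"
  | '>' :: _ => some "version_gt"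
  | '<' :: _ => some "version_lt"
  | _ => none

def pvOpLen (cs : List Char) : Nat :=
  match cs with
  | '=' :: '=' :: _ => 2 | '>' :: '=' :: _ => 2 | '<' :: '=' :: _ => 2 | _ => 1

def pvVersion (cs : List Char) : List Char :=
  PySem.Chars.strip (cs.drop (pvOpLen cs))

def pvClauseOK (cs : List Char) : Bool :=
  (pvField? cs).isSome && !(pvVersion cs).isEmpty
    && !((pvVersion cs).contains '*') && !((pvVersion cs).contains '|') && !((pvVersion cs).contains '~')

def Pre_parse_version_spec_py (spec : String) (conda_name : String) : Prop :=
  let s := PySem.Chars.strip spec.toList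
  s = [] ∨ s = ['*'] ∨
    (let clauses := (PySem.Chars.splitOn s [',']).map PySem.Chars.strip
     (∀ c ∈ clauses, pvClauseOK c = true) ∧ (clauses.map pvField?).Nodup)

instance (spec : String) (conda_name : String) : Decidable (Pre_parse_version_spec_py spec conda_name) := by
  unfold Pre_parse_version_spec_py; infer_instance

def pvWitness_parse_version_spec_py : String × String := (">=1.2.0, <2.0", "rclpy")

def Spec_parse_version_spec_py (spec : String) (conda_name : String) (out : List (String × String)) : Prop :=
  out = parse_version_spec_py_alt spec conda_name
instance (spec : String) (conda_name : String) (out : List (String × String)) : Decidable (Spec_parse_version_spec_py spec conda_name out) := by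
  unfold Spec_parse_version_spec_py; infer_instance

-- ===== CLAIM (what is proved, stated in full; the proofs are below) =====
def Claim_equal_parse_version_spec_py : Prop := ∀ (spec : String) (conda_name : String), Dom_parse_version_spec_py spec conda_name → Pre_parse_version_spec_py spec conda_name → Spec_parse_version_spec_py spec conda_name (parse_version_spec_py spec conda_name)

-- ===== LEMMAS AND PROOFS =====

-- A's operator-table scan, characterised by the first one or two characters.
theorem aFind_char (cs : List Char) :
    aFind opsA cs =
      match cs with
      | '=' :: '=' :: _ => some ("==", "version_eq")
      | '>' :: '=' :: _ => some (">=", "version_gte")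
      | '<' :: '=' :: _ => some ("<=", "version_lte")
      | '>' :: _ => some (">", "version_gt")
      | '<' :: _ => some ("<", "version_lt")
      | _ => none := by
  match cs with
  | [] => decide
  | [c] =>
    simp only [aFind, opsA, PySem.Chars.startswith]
    by_cases h1 : '>' = c <;> by_cases h2 : '<' = c <;>
      simp_all [List.isPrefixOf] <;> (try (subst_vars; simp_all)) <;>
      (try (split <;> simp_all))
  | c1 :: c2 :: rest =>
    simp only [aFind, opsA, PySem.Chars.startswith]
    by_cases h1 : '=' = c1 <;> by_cases h2 : '>' = c1 <;> by_cases h3 : '<' = c1 <;>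
      by_cases h4 : '=' = c2 <;> simp_all [List.isPrefixOf] <;>
      (try (subst_vars; simp_all)) <;> (try (split <;> simp_all))

-- On a clause, A's scan + remainder-strip computes the classifier's field and pvVersion.
theorem aStep (cs : List Char) :
    (aFind opsA cs).map (fun p => (p.2, PySem.Chars.strip (cs.drop p.1.toList.length)))
      = (pvField? cs).map (fun f => (f, pvVersion cs)) := by
  rw [aFind_char]
  have e1 : ("==" : String).toList.length = 2 := rfl
  have e2 : (">=" : String).toList.length = 2 := rfl
  have e3 : ("<=" : String).toList.length = 2 := rfl
  have e4 : (">" : String).toList.length = 1 := rfl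
  have e5 : ("<" : String).toList.length = 1 := rfl
  have f1 : ("==" : String).length = 2 := rfl
  have f2 : (">=" : String).length = 2 := rfl
  have f3 : ("<=" : String).length = 2 := rfl
  have f4 : (">" : String).length = 1 := rfl
  have f5 : ("<" : String).length = 1 := rfl
  match cs with
  | [] => rfl
  | [c] =>
    by_cases h1 : c = '>' <;> by_cases h2 : c = '<' <;>
      simp_all [pvField?, pvVersion, pvOpLen]
  | c1 :: c2 :: rest =>
    by_cases h1 : c1 = '=' <;> by_cases h2 : c1 = '>' <;> by_cases h3 : c1 = '<' <;>
      by_cases h4 : c2 = '=' <;>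
      simp_all [pvField?, pvVersion, pvOpLen]

theorem aStep' (cs : List Char) (f : String) (h : pvField? cs = some f) :
    ∃ op, aFind opsA cs = some (op, f) ∧
      PySem.Chars.strip (cs.drop op.toList.length) = pvVersion cs := by
  have := aStep cs
  rw [h] at this
  cases haf : aFind opsA cs with
  | none => rw [haf] at this; simp at this
  | some p =>
    rw [haf] at this
    simp only [Option.map_some, Option.some.injEq, Prod.ext_iff] at this
    refine ⟨p.1, ?_, this.2⟩
    obtain ⟨p1, p2⟩ := p
    simp_all

-- the canonical parsed pair of one (already stripped) clause
def pvPair (cs : List Char) : String × String :=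
  ((pvField? cs).getD "", String.ofList (pvVersion cs))

-- A's loop returns the accumulator extended by the parsed pairs of the clauses.
theorem aLoop_eq (cls : List (List Char)) (d : PySem.Dict String String)
    (hok : ∀ c ∈ cls, pvClauseOK (PySem.Chars.strip c) = true)
    (hnd : d.keys.Nodup)
    (hfresh : ∀ c ∈ cls, ∀ f, pvField? (PySem.Chars.strip c) = some f → f ∉ d.keys)
    (hdist : ((cls.map PySem.Chars.strip).map pvField?).Nodup) :
    ∃ d', aLoop cls d = some d' ∧
      d'.items = d.items ++ cls.map (fun c => pvPair (PySem.Chars.strip c)) := by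
  induction cls generalizing d with
  | nil => exact ⟨d, rfl, by simp⟩
  | cons c rest ih =>
    have hokc := hok c (by simp)
    have hf' : (pvField? (PySem.Chars.strip c)).isSome := by
      unfold pvClauseOK at hokc; simp only [Bool.and_eq_true] at hokc; exact hokc.1.1.1.1
    obtain ⟨f, hf⟩ := Option.isSome_iff_exists.mp hf'
    obtain ⟨op, hop, hver⟩ := aStep' _ _ hf
    have hokc' := hokc
    unfold pvClauseOK at hokc'
    simp only [Bool.and_eq_true, Bool.not_eq_true', List.isEmpty_eq_false_iff,
      List.contains_eq_mem, decide_eq_false_iff_not] at hokc'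
    obtain ⟨⟨⟨⟨_, hv⟩, h1⟩, h2⟩, h3⟩ := hokc'
    have hnotmem : f ∉ d.keys := hfresh c (by simp) f hf
    have hcon : d.contains f = false := by
      rw [← Bool.not_eq_true, PySem.Dict.contains_iff_mem_keys]; exact hnotmem
    have hguard : ¬ (pvVersion (PySem.Chars.strip c) = []
        ∨ (pvVersion (PySem.Chars.strip c)).contains '*' = true
        ∨ (pvVersion (PySem.Chars.strip c)).contains '|' = true
        ∨ (pvVersion (PySem.Chars.strip c)).contains '~' = true) := by
      simp only [List.contains_eq_mem, decide_eq_true_eq, not_or]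
      exact ⟨hv, h1, h2, h3⟩
    have step : aLoop (c :: rest) d
        = aLoop rest (d.insert f (String.ofList (pvVersion (PySem.Chars.strip c)))) := by
      unfold aLoop
      simp only [hop, hver, hguard, if_false, hcon, Bool.false_eq_true]
      rw [aLoop.eq_def]
    rw [step]
    have hins := PySem.Dict.items_insert_of_not_contains d
      (String.ofList (pvVersion (PySem.Chars.strip c))) hcon
    have hkeys := PySem.Dict.keys_insert_of_not_contains d
      (String.ofList (pvVersion (PySem.Chars.strip c))) hcon
    have hdist' := hdist
    simp only [List.map_cons, List.nodup_cons] at hdist'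
    obtain ⟨hnotin, hrest_nd⟩ := hdist'
    obtain ⟨d', hd', hitems⟩ := ih
      (d.insert f (String.ofList (pvVersion (PySem.Chars.strip c))))
      (fun c' hc' => hok c' (by simp [hc']))
      (by
        rw [hkeys]
        refine List.Nodup.append hnd (List.nodup_singleton f) ?_
        intro a ha hb
        rw [List.mem_singleton] at hb
        subst hb
        exact hnotmem ha)
      (by
        intro c' hc' f' hf'
        rw [hkeys]
        simp only [List.mem_append, List.mem_singleton, not_or]
        refine ⟨hfresh c' (by simp [hc']) f' hf', ?_⟩
        intro hff
        apply hnotin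
        have hmem : pvField? (PySem.Chars.strip c') ∈ (rest.map PySem.Chars.strip).map pvField? := by
          simp only [List.map_map, List.mem_map, Function.comp]
          exact ⟨c', hc', rfl⟩
        rw [hf', hff, ← hf] at hmem
        exact hmem)
      hrest_nd
    refine ⟨d', hd', ?_⟩
    rw [hitems, hins]
    simp [pvPair, hf]

-- ---- characterisation of split(",") as a structural recursion ----
def mySplit (cs : List Char) : List (List Char) :=
  match h : cs.dropWhile (fun x => x != ',') with
  | [] => [cs.takeWhile (fun x => x != ',')]
  | _ :: t => cs.takeWhile (fun x => x != ',') :: mySplit t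
termination_by cs.length
decreasing_by
  have := List.length_dropWhile_le (fun x => x != ',') cs
  rw [h] at this
  simp at this
  omega

theorem mySplit_head_tail (l : List Char) :
    mySplit l = (l.takeWhile (fun x => x != ','))
      :: (match l.dropWhile (fun x => x != ',') with | [] => [] | _ :: t => mySplit t) := by
  rw [mySplit.eq_def]
  split
  next h => rw [h]
  next x t h => rw [h]

theorem mySplit_cons_eq (l : List Char) :
    mySplit l = (mySplit l).headI :: (mySplit l).tail := by
  rw [mySplit_head_tail]; rfl

theorem go_spec (l : List Char) (fuel : Nat) (cur : List Char) (acc : List (List Char))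
    (h : l.length ≤ fuel) :
    PySem.Chars.splitOn.go [','] fuel l cur acc
      = acc.reverse ++ (cur.reverse ++ (mySplit l).headI) :: (mySplit l).tail := by
  induction l generalizing fuel cur acc with
  | nil =>
    have hm : mySplit ([] : List Char) = [[]] := by rw [mySplit_head_tail]; simp
    cases fuel <;> simp [PySem.Chars.splitOn.go, hm]
  | cons c rest ih =>
    cases fuel with
    | zero => simp at h
    | succ f =>
      rw [PySem.Chars.splitOn.go]
      by_cases hc : c = ','
      · subst hc
        have hpre : [','].isPrefixOf (',' :: rest) = true := by simp [List.isPrefixOf]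
        rw [if_pos hpre]
        have : List.drop ([','] : List Char).length (',' :: rest) = rest := by simp
        rw [this, ih f [] (cur.reverse :: acc) (by simpa using Nat.le_of_succ_le_succ h)]
        have hm : mySplit (',' :: rest) = [] :: mySplit rest := by
          rw [mySplit_head_tail (',' :: rest)]
          simp [List.takeWhile, List.dropWhile]
        rw [hm]
        simp [← mySplit_cons_eq rest]
      · have hpre : [','].isPrefixOf (c :: rest) = false := by
          simp [List.isPrefixOf]; exact fun hh => (hc hh.symm).elim
        rw [if_neg (by simp [hpre])]
        rw [ih f (c :: cur) acc (by simpa using Nat.le_of_succ_le_succ h)]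
        have hcb : (c != ',') = true := by simp [hc]
        have hm : mySplit (c :: rest) = (c :: (mySplit rest).headI) :: (mySplit rest).tail := by
          rw [mySplit_head_tail (c :: rest), mySplit_head_tail rest]
          simp [hcb]
        rw [hm]
        simp [mySplit_head_tail rest]

theorem splitOn_comma (cs : List Char) :
    PySem.Chars.splitOn cs [','] = mySplit cs := by
  unfold PySem.Chars.splitOn
  rw [go_spec cs (cs.length + 1) [] [] (by omega)]
  simp [← mySplit_cons_eq cs]

-- the concatenation the scanner walks: clauses joined by single commas
def joinComma : List (List Char) → List Char
  | [] => []
  | [c] => c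
  | c :: rest => c ++ ',' :: joinComma rest

theorem joinComma_mySplit (cs : List Char) : joinComma (mySplit cs) = cs := by
  rw [mySplit_head_tail]
  cases hd : cs.dropWhile (fun x => x != ',') with
  | nil =>
    have hcs : cs.takeWhile (fun x => x != ',') = cs := by
      conv_rhs => rw [← List.takeWhile_append_dropWhile (p := fun x => x != ',') (l := cs)]
      rw [hd]; simp
    simp [joinComma, hcs]
  | cons x t =>
    have hx : (x != ',') = false := by
      have h1 : cs.dropWhile (fun x => x != ',') ≠ [] := by simp [hd]
      have h2 := List.head_dropWhile_not (l := cs) (p := fun x => x != ',') h1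
      have h3 : (cs.dropWhile (fun x => x != ',')).head h1 = x := by simp [hd]
      rw [h3] at h2; simpa using h2
    have hx' : x = ',' := by simpa using hx
    subst hx'
    show joinComma (cs.takeWhile (fun x => x != ',') :: mySplit t) = cs
    rw [mySplit_cons_eq t]
    show (cs.takeWhile (fun x => x != ',')) ++ ',' :: joinComma ((mySplit t).headI :: (mySplit t).tail) = cs
    rw [← mySplit_cons_eq t, joinComma_mySplit t]
    conv_rhs => rw [← List.takeWhile_append_dropWhile (p := fun x => x != ',') (l := cs)]
    rw [hd]
termination_by cs.length
decreasing_by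
  have := List.length_dropWhile_le (fun x => x != ',') cs
  rw [hd] at this
  simp at this
  omega

theorem mySplit_ne_nil (cs : List Char) : mySplit cs ≠ [] := by
  rw [mySplit_head_tail]; simp

theorem mySplit_no_comma (cs : List Char) : ∀ c ∈ mySplit cs, ',' ∉ c := by
  intro c hc
  rw [mySplit_head_tail] at hc
  rcases List.mem_cons.mp hc with h | h
  · subst h
    intro hmem
    have := List.mem_takeWhile_imp hmem
    simp at this
  · revert h
    cases hd : cs.dropWhile (fun x => x != ',') with
    | nil => simp
    | cons x t =>
      intro h
      exact mySplit_no_comma t c h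
termination_by cs.length
decreasing_by
  have := List.length_dropWhile_le (fun x => x != ',') cs
  rw [hd] at this
  simp at this
  omega

-- ---- whitespace decomposition of strip ----
theorem lstrip_decomp (c : List Char) :
    ∃ w, (∀ x ∈ w, PySem.Chars.isspace x = true)
      ∧ c.dropWhile PySem.Chars.isspace = PySem.Chars.strip c ++ w := by
  refine ⟨((c.dropWhile PySem.Chars.isspace).reverse.takeWhile PySem.Chars.isspace).reverse, ?_, ?_⟩
  · intro x hx
    rw [List.mem_reverse] at hx
    exact List.mem_takeWhile_imp hx
  · show c.dropWhile PySem.Chars.isspace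
      = PySem.Chars.rstrip (PySem.Chars.lstrip c) ++ _
    unfold PySem.Chars.rstrip PySem.Chars.lstrip
    conv_lhs => rw [← List.reverse_reverse (c.dropWhile PySem.Chars.isspace)]
    conv_lhs => rw [← List.takeWhile_append_dropWhile
      (p := PySem.Chars.isspace) (l := (c.dropWhile PySem.Chars.isspace).reverse)]
    rw [List.reverse_append]

theorem strip_append_ws (x w : List Char) (hw : ∀ a ∈ w, PySem.Chars.isspace a = true) :
    PySem.Chars.strip (x ++ w) = PySem.Chars.strip x := by
  unfold PySem.Chars.strip PySem.Chars.rstrip PySem.Chars.lstrip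
  by_cases hx : x.dropWhile PySem.Chars.isspace = []
  · have h1 : (x ++ w).dropWhile PySem.Chars.isspace = w.dropWhile PySem.Chars.isspace := by
      rw [List.dropWhile_append, hx]; simp
    have h2 : w.dropWhile PySem.Chars.isspace = [] := List.dropWhile_eq_nil_iff.mpr (fun a ha => hw a ha)
    rw [h1, h2, hx]
  · have h1 : (x ++ w).dropWhile PySem.Chars.isspace = x.dropWhile PySem.Chars.isspace ++ w := by
      rw [List.dropWhile_append]
      simp [List.isEmpty_eq_false_iff.mpr hx]
    rw [h1, List.reverse_append]
    congr 1
    rw [List.dropWhile_append]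
    have h2 : w.reverse.dropWhile PySem.Chars.isspace = [] :=
      List.dropWhile_eq_nil_iff.mpr (fun a ha => hw a (List.mem_reverse.mp ha))
    rw [h2]
    simp

-- strip only keeps characters of the clause
theorem mem_strip (c : List Char) (x : Char) (h : x ∈ PySem.Chars.strip c) : x ∈ c := by
  unfold PySem.Chars.strip PySem.Chars.rstrip PySem.Chars.lstrip at h
  rw [List.mem_reverse] at h
  have h1 := (List.dropWhile_sublist _).subset h
  rw [List.mem_reverse] at h1
  exact (List.dropWhile_sublist _).subset h1

-- ---- the scanner run on one clause ----
-- reading the operator from a stripped clause followed by junk whose first character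
-- is not '=' is exactly the classifier pvField? plus the pvOpLen-drop
theorem bReadOp_clause (sc z : List Char) (f : String) (h : pvField? sc = some f)
    (hz : ∀ x, z.head? = some x → x ≠ '=') :
    bReadOp (sc ++ z) = some (f, sc.drop (pvOpLen sc) ++ z) := by
  match sc with
  | [] => simp [pvField?] at h
  | [c] =>
    have hz' : ∀ r, z = '=' :: r → False := by
      intro r hr
      exact hz '=' (by simp [hr]) rfl
    by_cases h1 : c = '>' <;> by_cases h2 : c = '<' <;>
      simp_all [pvField?, pvOpLen] <;>
      (cases z with
       | nil => simp_all [bReadOp]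
       | cons a r =>
         have : a ≠ '=' := fun hh => hz' r (by rw [hh])
         subst_vars <;> simp_all [bReadOp])
  | c1 :: c2 :: rest =>
    by_cases h1 : c1 = '=' <;> by_cases h2 : c1 = '>' <;> by_cases h3 : c1 = '<' <;>
      by_cases h4 : c2 = '=' <;> simp_all [pvField?, pvOpLen, bReadOp]

-- running the scanner across 'clause ++ t' (t empty or starting with ','):
-- it parses the clause and continues exactly at t
theorem bStep (c t : List Char) (hc : ',' ∉ c)
    (hok : pvClauseOK (PySem.Chars.strip c) = true)
    (ht : t = [] ∨ ∃ t', t = ',' :: t') (d : PySem.Dict String String) :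
    ∃ f, pvField? (PySem.Chars.strip c) = some f ∧
    bLoop (c ++ t) d =
      (if d.contains f then none
       else match t with
         | [] => some (d.insert f (String.ofList (pvVersion (PySem.Chars.strip c))))
         | _ :: t' => bLoop t' (d.insert f (String.ofList (pvVersion (PySem.Chars.strip c))))) := by
  have hokc := hok
  unfold pvClauseOK at hokc
  simp only [Bool.and_eq_true, Bool.not_eq_true', List.isEmpty_eq_false_iff,
    List.contains_eq_mem, decide_eq_false_iff_not] at hokc
  obtain ⟨⟨⟨⟨hfsome, hv⟩, h1⟩, h2⟩, h3⟩ := hokc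
  obtain ⟨f, hf⟩ := Option.isSome_iff_exists.mp hfsome
  refine ⟨f, hf, ?_⟩
  obtain ⟨w, hw, hlc⟩ := lstrip_decomp c
  set sc := PySem.Chars.strip c with hsc
  have hscne : sc ≠ [] := by
    intro hnil
    rw [hnil] at hf
    simp [pvField?] at hf
  -- the leading-whitespace skip stops inside the clause
  have hskip : (c ++ t).dropWhile PySem.Chars.isspace = sc ++ (w ++ t) := by
    rw [List.dropWhile_append, hlc]
    have : (sc ++ w).isEmpty = false := by
      simp [List.isEmpty_eq_false_iff, hscne]
    rw [this]
    simp
  -- first character after the clause's stripped body is never '='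
  have hz : ∀ x, (w ++ t).head? = some x → x ≠ '=' := by
    intro x hx
    cases w with
    | nil =>
      rcases ht with h | ⟨t', h⟩ <;> subst h <;> simp_all
      rintro rfl
      simp at hx
    | cons a wr =>
      have ha : PySem.Chars.isspace a = true := hw a (by simp)
      simp at hx
      subst hx
      intro hcon
      rw [hcon] at ha
      simp [PySem.Chars.isspace] at ha
  have hread := bReadOp_clause sc (w ++ t) f hf hz
  -- no comma before t: the version scan stops exactly at t
  have hnd : ∀ x ∈ sc.drop (pvOpLen sc) ++ w, (x != ',') = true := by
    intro x hx
    rcases List.mem_append.mp hx with hx | hx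
    · have : x ∈ c := mem_strip c x (List.drop_subset _ _ hx)
      simp; rintro rfl; exact hc this
    · have := hw x hx
      simp; rintro rfl; simp [PySem.Chars.isspace] at this
  have htake : ((sc.drop (pvOpLen sc) ++ w) ++ t).takeWhile (fun x => x != ',')
      = sc.drop (pvOpLen sc) ++ w := by
    rw [List.takeWhile_append]
    have hall : (sc.drop (pvOpLen sc) ++ w).takeWhile (fun x => x != ',')
        = sc.drop (pvOpLen sc) ++ w := List.takeWhile_eq_self_iff.mpr hnd
    rw [hall]
    rcases ht with h | ⟨t', h⟩ <;> subst h <;> simp [List.takeWhile]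

  have hdrop : ((sc.drop (pvOpLen sc) ++ w) ++ t).dropWhile (fun x => x != ',') = t := by
    rw [List.dropWhile_append]
    have hall : (sc.drop (pvOpLen sc) ++ w).dropWhile (fun x => x != ',') = [] :=
      List.dropWhile_eq_nil_iff.mpr (fun a ha => hnd a ha)
    rw [hall]
    simp only [List.isEmpty_nil]
    rcases ht with h | ⟨t', h⟩ <;> subst h <;> simp [List.dropWhile]
  have hver : PySem.Chars.strip (sc.drop (pvOpLen sc) ++ w) = pvVersion sc := by
    rw [strip_append_ws _ _ hw]; rfl
  have hguard : ¬ (pvVersion sc = [] ∨ (pvVersion sc).contains '*' = true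
      ∨ (pvVersion sc).contains '|' = true ∨ (pvVersion sc).contains '~' = true) := by
    simp only [List.contains_eq_mem, decide_eq_true_eq, not_or]
    exact ⟨hv, h1, h2, h3⟩
  have hr' : List.drop (pvOpLen sc) sc ++ (w ++ t) = (List.drop (pvOpLen sc) sc ++ w) ++ t := by
    rw [List.append_assoc]
  rw [bLoop.eq_def]
  simp only []
  split
  · next hnone =>
      rw [hskip, hread] at hnone
      simp at hnone
  · next field r hsome =>
      rw [hskip, hread] at hsome
      simp only [Option.some.injEq, Prod.mk.injEq] at hsome
      obtain ⟨hfield, hr⟩ := hsome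
      subst hfield
      subst hr
      rw [hr', htake, hver, if_neg hguard]
      by_cases hcf : d.contains f = true
      · simp only [hcf, if_true]
      · simp only [hcf, Bool.false_eq_true, if_false]
        split
        · next h2 =>
            rw [hdrop] at h2
            subst h2
            rfl
        · next x t' h2 =>
            rw [hdrop] at h2
            subst h2
            rfl

-- B's scanner over comma-joined clauses builds the same dict as clause-by-clause insertion.
theorem bLoop_clauses (cls : List (List Char)) (d : PySem.Dict String String)
    (hnc : ∀ c ∈ cls, ',' ∉ c)
    (hok : ∀ c ∈ cls, pvClauseOK (PySem.Chars.strip c) = true)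
    (hnd : d.keys.Nodup)
    (hfresh : ∀ c ∈ cls, ∀ f, pvField? (PySem.Chars.strip c) = some f → f ∉ d.keys)
    (hdist : ((cls.map PySem.Chars.strip).map pvField?).Nodup)
    (hne : cls ≠ []) :
    ∃ d', bLoop (joinComma cls) d = some d' ∧
      d'.items = d.items ++ cls.map (fun c => pvPair (PySem.Chars.strip c)) := by
  induction cls generalizing d with
  | nil => exact absurd rfl hne
  | cons c rest ih =>
    cases rest with
    | nil =>
      obtain ⟨f, hf, hstep⟩ := bStep c [] (hnc c (by simp)) (hok c (by simp)) (Or.inl rfl) d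
      have hnotmem : f ∉ d.keys := hfresh c (by simp) f hf
      have hcon : d.contains f = false := by
        rw [← Bool.not_eq_true, PySem.Dict.contains_iff_mem_keys]; exact hnotmem
      have hj : joinComma [c] = c ++ ([] : List Char) := by simp [joinComma]
      rw [hj, hstep, hcon]
      simp only [Bool.false_eq_true, if_false]
      refine ⟨_, rfl, ?_⟩
      rw [PySem.Dict.items_insert_of_not_contains d _ hcon]
      simp [pvPair, hf]
    | cons c2 r2 =>
      obtain ⟨f, hf, hstep⟩ := bStep c (',' :: joinComma (c2 :: r2)) (hnc c (by simp))
        (hok c (by simp)) (Or.inr ⟨_, rfl⟩) d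
      have hnotmem : f ∉ d.keys := hfresh c (by simp) f hf
      have hcon : d.contains f = false := by
        rw [← Bool.not_eq_true, PySem.Dict.contains_iff_mem_keys]; exact hnotmem
      have hj : joinComma (c :: c2 :: r2) = c ++ (',' :: joinComma (c2 :: r2)) := rfl
      rw [hj, hstep, hcon]
      simp only [Bool.false_eq_true, if_false]
      have hins := PySem.Dict.items_insert_of_not_contains d
        (String.ofList (pvVersion (PySem.Chars.strip c))) hcon
      have hkeys := PySem.Dict.keys_insert_of_not_contains d
        (String.ofList (pvVersion (PySem.Chars.strip c))) hcon
      have hdist' := hdist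
      rw [List.map_cons, List.map_cons, List.nodup_cons] at hdist'
      obtain ⟨hnotin, hrest_nd⟩ := hdist'
      obtain ⟨d', hd', hitems⟩ := ih
        (d.insert f (String.ofList (pvVersion (PySem.Chars.strip c))))
        (fun c' hc' => hnc c' (by simp [hc']))
        (fun c' hc' => hok c' (by simp [hc']))
        (by
          rw [hkeys]
          refine List.Nodup.append hnd (List.nodup_singleton f) ?_
          intro a ha hb
          rw [List.mem_singleton] at hb
          subst hb
          exact hnotmem ha)
        (by
          intro c' hc' f' hf'
          rw [hkeys]
          simp only [List.mem_append, List.mem_singleton, not_or]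
          refine ⟨hfresh c' (by simp [hc']) f' hf', ?_⟩
          intro hff
          apply hnotin
          have hmem : pvField? (PySem.Chars.strip c')
              ∈ ((c2 :: r2).map PySem.Chars.strip).map pvField? := by
            simp only [List.map_map, List.mem_map, Function.comp]
            exact ⟨c', hc', rfl⟩
          rw [hf', hff, ← hf] at hmem
          exact hmem)
        hrest_nd
        (by simp)
      refine ⟨d', hd', ?_⟩
      rw [hitems, hins]
      simp [pvPair, hf]

-- ===== VERDICT (by name: the statement is the Claim_ definition above) =====
theorem parse_version_spec_py_spec : Claim_equal_parse_version_spec_py := by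
  unfold Claim_equal_parse_version_spec_py
  intro spec conda_name _ hpre
  unfold Spec_parse_version_spec_py parse_version_spec_py parse_version_spec_py_alt
  by_cases hs : PySem.Chars.strip spec.toList = [] ∨ PySem.Chars.strip spec.toList = ['*']
  · simp only [hs, if_true]
  · simp only [hs, if_false]
    unfold Pre_parse_version_spec_py at hpre
    rcases hpre with h | h | hp
    · exact absurd (Or.inl h) hs
    · exact absurd (Or.inr h) hs
    obtain ⟨hok, hdist⟩ := hp
    rw [splitOn_comma] at hok hdist ⊢
    have hok' : ∀ c ∈ mySplit (PySem.Chars.strip spec.toList),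
        pvClauseOK (PySem.Chars.strip c) = true := by
      intro c hc
      exact hok _ (List.mem_map_of_mem hc)
    obtain ⟨dA, hdA, hitemsA⟩ := aLoop_eq (mySplit (PySem.Chars.strip spec.toList))
      PySem.Dict.empty hok' (by simp) (by intro c hc f hf; simp) hdist
    obtain ⟨dB, hdB, hitemsB⟩ := bLoop_clauses (mySplit (PySem.Chars.strip spec.toList))
      PySem.Dict.empty (mySplit_no_comma _) hok' (by simp) (by intro c hc f hf; simp) hdist
      (mySplit_ne_nil _)
    rw [joinComma_mySplit] at hdB
    rw [hdA, hdB]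
    show dA.items = dB.items
    rw [hitemsA, hitemsB]
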